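-- pv_equiv track=rewrite | github.com/fbm2718/QREM | functions/functions_data_analysis.py | add_counts_from_dictionaries
-- ===== SOURCE A (Python) =====
-- from typing import Dict, List
-- import copy
--
-- def add_counts_from_dictionaries(counts_dictionaries_list: List[Dict[str, int]]) -> Dict[str, int]:
--     """
--     Merge multiple counts dictionaries.
--     This is useful when you have results of multiple implementations of the same experiment.
--
--     :param counts_dictionaries_list: list of results of counts dictionaries of the form:
--                                     {'bitstring":number of measurements}
--     :return:
--     """
--
--     # first dictionary will be template to which we will add counts
--     merged_counts = copy.deepcopy(counts_dictionaries_list[0])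
--
--     # we go through all other dictionaries
--     for counts_dictionary in counts_dictionaries_list[1:]:
--         for bitstring, ticks in counts_dictionary.items():
--             if bitstring in merged_counts.keys():
--                 merged_counts[bitstring] += ticks
--             else:
--                 merged_counts[bitstring] = ticks
--
--     return merged_counts
-- ===== SOURCE B (Python) =====
-- def add_counts_from_dictionaries(counts_dictionaries_list):
--     """Merge counts dictionaries by a staged group-by:
--     flatten all items into one list, list the distinct bitstrings in
--     first-occurrence order, then sum each bitstring's ticks with its own scan.
--     No dict accumulator and no membership branch."""
--     flat = [item for d in counts_dictionaries_list for item in d.items()]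
--     return {k: sum(v for k2, v in flat if k2 == k)
--             for k in dict.fromkeys(k for k, _ in flat)}
-- ===== Notes on version B (the rewrite author's own statement) =====
-- stated objective: alternative
-- what changed: B replaces A's single-pass dict accumulation (deepcopy first dict, then branchy add/insert) with a staged group-by: flatten all items into one list, dedup the keys in first-occurrence order, then compute each key's total with its own sum-scan over the flat list (B also happens to return {} on the empty list, where A raises IndexError; Pre_ excludes that input).
import Mathlib
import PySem

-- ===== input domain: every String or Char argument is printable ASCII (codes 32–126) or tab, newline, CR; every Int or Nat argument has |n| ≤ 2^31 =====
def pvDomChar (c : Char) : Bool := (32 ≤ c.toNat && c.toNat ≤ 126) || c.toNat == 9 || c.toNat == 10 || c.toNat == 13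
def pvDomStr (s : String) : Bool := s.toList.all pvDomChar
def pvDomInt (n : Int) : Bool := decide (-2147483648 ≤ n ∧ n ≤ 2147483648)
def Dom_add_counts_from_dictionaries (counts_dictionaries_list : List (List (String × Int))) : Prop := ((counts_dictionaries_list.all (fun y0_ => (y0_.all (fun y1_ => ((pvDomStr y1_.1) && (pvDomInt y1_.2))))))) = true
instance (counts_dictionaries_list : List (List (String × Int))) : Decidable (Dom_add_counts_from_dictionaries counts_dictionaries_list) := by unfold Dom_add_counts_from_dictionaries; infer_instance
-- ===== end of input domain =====

-- B replaces A's single-pass dict accumulation by a staged group-by (flatten the items,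
-- dedup the keys in first-occurrence order, one sum-scan per key); objective: alternative.

-- ===== PORT A =====
-- merged = deepcopy(lst[0]); for d in lst[1:]: for (k,v) in d.items(): branchy add/insert.
-- lst[0] is PySem.List.pyGet? …; Pre_ (nonempty list) guarantees it is `some`, `.getD []` only totalises.
def add_counts_from_dictionaries (counts_dictionaries_list : List (List (String × Int))) : List (String × Int) :=
  let merged0 : PySem.Dict String Int :=
    PySem.Dict.mk ((PySem.List.pyGet? counts_dictionaries_list 0).getD [])
  let merged :=
    (PySem.List.slice counts_dictionaries_list (some 1) none).foldl
      (fun m counts_dictionary =>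
        counts_dictionary.foldl
          (fun m p =>
            if m.contains p.1 then m.modify p.1 0 (fun x => x + p.2)
            else m.insert p.1 p.2) m)
      merged0
  merged.items

-- ===== PORT B =====
-- flat = [item for d in lst for item in d.items()]; dict.fromkeys = PySem.List.dedup;
-- {k: sum(v for k2,v in flat if k2 == k) for k in …}.
def add_counts_from_dictionaries_alt (counts_dictionaries_list : List (List (String × Int))) : List (String × Int) :=
  let flat := counts_dictionaries_list.flatMap (fun d => d)
  (PySem.List.dedup (flat.map Prod.fst)).map
    (fun k => (k, ((flat.filter (fun q => q.1 == k)).map Prod.snd).sum))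

-- ===== PRECONDITION & SPEC =====
-- Pre_ excludes the empty list (A raises IndexError there) and inner lists with duplicate keys,
-- which do not represent Python dicts at all (a Python dict cannot hold a duplicate key).
def Pre_add_counts_from_dictionaries (counts_dictionaries_list : List (List (String × Int))) : Prop :=
  counts_dictionaries_list ≠ [] ∧
  ∀ d ∈ counts_dictionaries_list, (d.map Prod.fst).Nodup
instance (counts_dictionaries_list : List (List (String × Int))) : Decidable (Pre_add_counts_from_dictionaries counts_dictionaries_list) := by unfold Pre_add_counts_from_dictionaries; infer_instance

def pvWitness_add_counts_from_dictionaries : (List (List (String × Int))) :=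
  [[("00", 3), ("11", 1)], [("11", 2), ("01", 5)]]

def Spec_add_counts_from_dictionaries (counts_dictionaries_list : List (List (String × Int))) (out : List (String × Int)) : Prop := out = add_counts_from_dictionaries_alt counts_dictionaries_list
instance (counts_dictionaries_list : List (List (String × Int))) (out : List (String × Int)) : Decidable (Spec_add_counts_from_dictionaries counts_dictionaries_list out) := by unfold Spec_add_counts_from_dictionaries; infer_instance

-- ===== CLAIM (what is proved, stated in full; the proofs are below) =====
def Claim_equal_add_counts_from_dictionaries : Prop := ∀ (counts_dictionaries_list : List (List (String × Int))), Dom_add_counts_from_dictionaries counts_dictionaries_list → Pre_add_counts_from_dictionaries counts_dictionaries_list → Spec_add_counts_from_dictionaries counts_dictionaries_list (add_counts_from_dictionaries counts_dictionaries_list)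

-- ===== LEMMAS AND PROOFS =====

-- A's branchy update step IS the uniform step insert k (getD k 0 + v)
-- (modify with default 0 when present; a fresh insert adds 0 + v = v).
lemma step_eq (m : PySem.Dict String Int) (p : String × Int) :
    (if m.contains p.1 then m.modify p.1 0 (fun x => x + p.2) else m.insert p.1 p.2)
      = m.insert p.1 (m.getD p.1 0 + p.2) := by
  by_cases h : m.contains p.1 = true
  · simp [PySem.Dict.modify, h]
  · simp [h, PySem.Dict.getD_of_not_contains m 0 (by simpa using h)]

-- Folding the uniform step over a nodup-key list of keys fresh for m appends it verbatim
-- (turns A's starting dict Dict.mk h into a fold from empty).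
lemma buildB (d : List (String × Int)) (m : PySem.Dict String Int)
    (hfresh : ∀ p ∈ d, m.contains p.1 = false) (hnd : (d.map Prod.fst).Nodup) :
    d.foldl (fun m p => m.insert p.1 (m.getD p.1 0 + p.2)) m = PySem.Dict.mk (m.items ++ d) := by
  induction d generalizing m with
  | nil => simp
  | cons p d ih =>
    have hp : m.contains p.1 = false := hfresh p (by simp)
    have hins : m.insert p.1 (m.getD p.1 0 + p.2) = PySem.Dict.mk (m.items ++ [p]) := by
      apply PySem.Dict.ext
      rw [PySem.Dict.getD_of_not_contains m 0 hp, zero_add]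
      exact PySem.Dict.items_insert_of_not_contains m p.2 hp
    have hnd0 : p.1 ∉ d.map Prod.fst ∧ (d.map Prod.fst).Nodup := by
      rw [List.map_cons, List.nodup_cons] at hnd; exact hnd
    have hfresh' : ∀ q ∈ d, (PySem.Dict.mk (m.items ++ [p]) : PySem.Dict String Int).contains q.1 = false := by
      intro q hq
      rw [← hins, PySem.Dict.contains_insert]
      have hne : q.1 ≠ p.1 := fun he => hnd0.1 (he ▸ List.mem_map_of_mem hq)
      simp [hfresh q (List.mem_cons_of_mem _ hq), hne]
    calc (p :: d).foldl (fun m p => m.insert p.1 (m.getD p.1 0 + p.2)) m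
        = d.foldl (fun m p => m.insert p.1 (m.getD p.1 0 + p.2)) (PySem.Dict.mk (m.items ++ [p])) := by
          rw [List.foldl_cons, hins]
      _ = PySem.Dict.mk (m.items ++ p :: d) := by rw [ih _ hfresh' hnd0.2]; simp

-- Lookup in the accumulation fold is the starting value plus the sum of the matching ticks.
lemma getD_fold (xs : List (String × Int)) (d : PySem.Dict String Int) (k : String) :
    (xs.foldl (fun m p => m.insert p.1 (m.getD p.1 0 + p.2)) d).getD k 0
      = d.getD k 0 + ((xs.filter (fun q => q.1 == k)).map Prod.snd).sum := by
  induction xs generalizing d with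
  | nil => simp
  | cons p xs ih =>
    rw [List.foldl_cons, ih, List.filter_cons]
    by_cases h : p.1 = k
    · subst h
      simp [PySem.Dict.getD_insert_self, add_assoc]
    · rw [PySem.Dict.getD_insert_of_ne (hne := Ne.symm h)]
      simp [h]

-- The accumulation fold from empty over the flat item list IS B's group-by.
lemma fold_eq_groupby (xs : List (String × Int)) :
    (xs.foldl (fun m p => m.insert p.1 (m.getD p.1 0 + p.2))
        (PySem.Dict.empty : PySem.Dict String Int)).items
      = (PySem.List.dedup (xs.map Prod.fst)).map
          (fun k => (k, ((xs.filter (fun q => q.1 == k)).map Prod.snd).sum)) := by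
  set M := xs.foldl (fun m p => m.insert p.1 (m.getD p.1 0 + p.2))
      (PySem.Dict.empty : PySem.Dict String Int) with hM
  have hkeys : M.keys = PySem.Set.ofList (xs.map Prod.fst) := by
    rw [hM, PySem.Dict.keys_foldl_insert_key (key := Prod.fst)
      (f := fun m p => m.getD p.1 0 + p.2)]
    simp [PySem.Set.update_nil_left]
  have hnd : M.keys.Nodup := by
    rw [hkeys]; exact PySem.Set.nodup_ofList _
  rw [PySem.Dict.items_eq_map_keys M hnd 0, hkeys]
  simp only [PySem.List.dedup_eq_ofList]
  refine List.map_congr_left ?_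
  intro k _
  rw [hM, getD_fold]
  simp

-- ===== VERDICT (by name: the statement is the Claim_ definition above) =====
theorem add_counts_from_dictionaries_spec : Claim_equal_add_counts_from_dictionaries := by
  intro l _ hpre
  obtain ⟨hne, hnd⟩ := hpre
  obtain ⟨h, t, rfl⟩ := List.exists_cons_of_ne_nil hne
  show add_counts_from_dictionaries (h :: t) = add_counts_from_dictionaries_alt (h :: t)
  have hsteps : (fun (m : PySem.Dict String Int) (p : String × Int) =>
      if m.contains p.1 then m.modify p.1 0 (fun x => x + p.2) else m.insert p.1 p.2)
      = fun m p => m.insert p.1 (m.getD p.1 0 + p.2) := by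
    funext m p; exact step_eq m p
  have hget : (PySem.List.pyGet? (h :: t) (0 : Int)).getD [] = h := by
    simp [PySem.List.pyGet?, PySem.List.pyIdx?]
  have hstart : PySem.Dict.mk h
      = h.foldl (fun m p => m.insert p.1 (m.getD p.1 0 + p.2))
          (PySem.Dict.empty : PySem.Dict String Int) := by
    rw [buildB h _ (fun p _ => PySem.Dict.contains_empty p.1) (hnd h (by simp))]
    simp [PySem.Dict.empty]
  have hflat : (h :: t).flatMap (fun d => d) = h ++ t.flatten := by
    simp [List.flatMap_def]
  simp only [add_counts_from_dictionaries, add_counts_from_dictionaries_alt,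
    PySem.List.slice_from_one, List.tail_cons, hsteps, hget, hstart, hflat,
    ← List.foldl_flatten, ← List.foldl_append, fold_eq_groupby]
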